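-- pv_equiv track=rewrite | github.com/Josh0104/red-scare-aldes-2025 | working none.py | solve_none
-- ===== SOURCE A (Python) =====
-- from collections import deque
--
-- def solve_none(n, edges, s, t, red_vertices):
--     """
--     Finds the length of the shortest s, t-path internally avoiding R using BFS.
--
--     Per the problem definition:
--     - "Internally avoiding R" means a path v_1, ..., v_l is valid if
--       v_i is not in R for all 1 < i < l.
--     - This means s (v_1) and t (v_l) ARE allowed to be red.
--     """
--
--     # --- 1. Build Adjacency List ---
--     adj = {}
--     for edge_line in edges:
--         edge = edge_line.strip()
--         # Check for both directed and undirected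
--         if ' -- ' in edge:
--             u, v = edge.split(' -- ')
--             adj.setdefault(u, []).append(v)
--             adj.setdefault(v, []).append(u)
--         elif ' -> ' in edge:
--             u, v = edge.split(' -> ')
--             adj.setdefault(u, []).append(v)
--             # For directed, we don't add the reverse edge
--
--     # --- 2. Handle Edge Cases ---
--     if s == t:
--         return 0
--
--     # --- 3. Initialize BFS ---
--     queue = deque([(s, 0)])  # (vertex, distance)
--     visited = {s}
--
--     # --- 4. Run BFS ---
--     while queue:
--         current_vertex, dist = queue.popleft()
--
--         for neighbor in adj.get(current_vertex, []):
--
--             if neighbor in visited: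
--                 continue
--
--             # CASE 1: The neighbor is the target 't'.
--             # This is always a valid path.
--             if neighbor == t:
--                 return dist + 1
--
--             # CASE 2: The neighbor is NOT 't' and IS RED.
--             # This is an "internal" node. We are not allowed
--             # to use this path. Skip this neighbor.
--             if neighbor in red_vertices:
--                 continue
--
--             # CASE 3: The neighbor is NOT 't' and is NOT RED.
--             # This is a valid internal node. Add it to the queue.
--             visited.add(neighbor)
--             queue.append((neighbor, dist + 1))
--
--     # --- 5. No Path Found ---
--     return -1
-- ===== SOURCE B (Python) =====
-- def solve_none(n, edges, s, t, red_vertices):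
--     # Reachable-set fixpoint instead of a vertex-by-vertex BFS: repeatedly
--     # expand the whole set of vertices reachable via non-red interiors and
--     # count rounds until t appears in the one-step expansion or the set
--     # stops growing.
--     adj = {}
--     for edge_line in edges:
--         edge = edge_line.strip()
--         if ' -- ' in edge:
--             u, v = edge.split(' -- ')
--             adj.setdefault(u, []).append(v)
--             adj.setdefault(v, []).append(u)
--         elif ' -> ' in edge:
--             u, v = edge.split(' -> ')
--             adj.setdefault(u, []).append(v)
--
--     if s == t:
--         return 0
--
--     reach = {s}
--     depth = 0
--     while True:
--         depth += 1
--         step = set()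
--         for u in reach:
--             step.update(adj.get(u, []))
--         if t in step:
--             return depth
--         grown = reach | {v for v in step if v not in red_vertices}
--         if grown == reach:
--             return -1
--         reach = grown
-- ===== Notes on version B (the rewrite author's own statement) =====
-- stated objective: alternative
-- what changed: The queue BFS is replaced by a reachable-set fixpoint iteration: each round expands the whole set of reachable vertices by one edge step and counts rounds until t appears in the expansion or the set stops growing (no queue, no frontier, no per-vertex distance bookkeeping); the adjacency-list parsing is kept verbatim.
import Mathlib
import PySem

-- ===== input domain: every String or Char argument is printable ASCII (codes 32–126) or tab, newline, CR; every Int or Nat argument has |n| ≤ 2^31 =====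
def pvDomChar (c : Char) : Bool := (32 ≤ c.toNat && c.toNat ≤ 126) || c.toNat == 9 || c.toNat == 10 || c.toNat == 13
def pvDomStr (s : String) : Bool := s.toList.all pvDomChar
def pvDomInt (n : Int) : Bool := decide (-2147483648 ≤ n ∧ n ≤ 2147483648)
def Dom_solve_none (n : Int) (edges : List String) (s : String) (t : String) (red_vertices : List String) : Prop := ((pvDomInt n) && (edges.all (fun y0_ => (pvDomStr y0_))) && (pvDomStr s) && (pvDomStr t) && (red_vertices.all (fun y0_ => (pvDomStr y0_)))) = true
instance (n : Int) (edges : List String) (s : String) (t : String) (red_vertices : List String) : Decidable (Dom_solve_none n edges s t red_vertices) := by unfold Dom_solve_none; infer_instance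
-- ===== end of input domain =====

-- B replaces A's queue BFS by a reachable-set fixpoint iteration: each round expands the
-- WHOLE reachable set by one edge step and counts rounds until t appears or the set stops
-- growing (no queue, no frontier); same results, different algorithmic mechanism.

-- ===== PORT A =====
-- A's inner `for neighbor in adj.get(current_vertex, [])` loop:
-- .error r = the `return dist + 1` early exit, .ok = the updated (queue, visited).
def pvStepA (t : String) (red : List String) (dist : Int) :
    List String → List (String × Int) → PySem.Set String → Except Int (List (String × Int) × PySem.Set String)
  | [], q, vis => .ok (q, vis)
  | nb :: rest, q, vis =>
    if PySem.Set.contains vis nb then pvStepA t red dist rest q vis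
    else if nb == t then .error (dist + 1)
    else if red.contains nb then pvStepA t red dist rest q vis
    else pvStepA t red dist rest (q ++ [(nb, dist + 1)]) (PySem.Set.add vis nb)

-- A's `while queue:` loop; fuel ticks once per popleft (the top-level fuel bounds the
-- number of pops, so exhaustion is unreachable on real runs).
def pvLoopA (adj : PySem.Dict String (List String)) (t : String) (red : List String) :
    Nat → List (String × Int) → PySem.Set String → Int
  | _, [], _ => -1
  | 0, _ :: _, _ => -1
  | f + 1, (v, dist) :: rest, vis =>
    match pvStepA t red dist (adj.getD v []) rest vis with
    | .error r => r
    | .ok (q, vis') => pvLoopA adj t red f q vis'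

-- A's adjacency-list build (setdefault(u, []).append(v) = insert u (getD u [] ++ [v])).
def pvBuildAdjA (edges : List String) : PySem.Dict String (List String) :=
  edges.foldl (fun adj line =>
    let edge := PySem.Str.strip line
    if PySem.Str.isIn " -- " edge then
      match PySem.Str.split? edge " -- " with
      | some [u, v] =>
        let adj := adj.insert u (adj.getD u [] ++ [v])
        adj.insert v (adj.getD v [] ++ [u])
      | _ => adj      -- Python raises ValueError here; excluded by Pre_solve_none
    else if PySem.Str.isIn " -> " edge then
      match PySem.Str.split? edge " -> " with
      | some [u, v] => adj.insert u (adj.getD u [] ++ [v])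
      | _ => adj      -- Python raises ValueError here; excluded by Pre_solve_none
    else adj) PySem.Dict.empty

def solve_none (n : Int) (edges : List String) (s : String) (t : String) (red_vertices : List String) : Int :=
  let adj := pvBuildAdjA edges
  if s == t then 0
  else
    pvLoopA adj t red_vertices ((adj.values.map List.length).sum + 2) [(s, 0)] (PySem.Set.ofList [s])

-- ===== PORT B =====
-- B's `step = set(); for u in reach: step.update(adj.get(u, []))` (one-edge expansion).
def pvExpand (adj : PySem.Dict String (List String)) (reach : PySem.Set String) : PySem.Set String :=
  reach.foldl (fun st u => PySem.Set.update st (adj.getD u [])) PySem.Set.empty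

-- B's `while True:` round loop; fuel ticks once per round (the reach set strictly grows
-- inside a finite universe, so the top-level fuel makes exhaustion unreachable).
def pvLoopC (adj : PySem.Dict String (List String)) (t : String) (red : List String) :
    Nat → PySem.Set String → Int → Int
  | 0, _, _ => -1
  | f + 1, reach, depth =>
    let step := pvExpand adj reach
    if PySem.Set.contains step t then depth + 1
    else
      let grown := PySem.Set.union reach (PySem.Set.ofList (step.filter (fun v => !(red.contains v))))
      if PySem.Set.equal grown reach then -1
      else pvLoopC adj t red f grown (depth + 1)

-- B's adjacency-list build (identical to A's: the parsing is kept verbatim).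
def pvBuildAdjB (edges : List String) : PySem.Dict String (List String) :=
  edges.foldl (fun adj line =>
    let edge := PySem.Str.strip line
    if PySem.Str.isIn " -- " edge then
      match PySem.Str.split? edge " -- " with
      | some [u, v] =>
        let adj := adj.insert u (adj.getD u [] ++ [v])
        adj.insert v (adj.getD v [] ++ [u])
      | _ => adj      -- Python raises ValueError here; excluded by Pre_solve_none
    else if PySem.Str.isIn " -> " edge then
      match PySem.Str.split? edge " -> " with
      | some [u, v] => adj.insert u (adj.getD u [] ++ [v])
      | _ => adj      -- Python raises ValueError here; excluded by Pre_solve_none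
    else adj) PySem.Dict.empty

def solve_none_alt (n : Int) (edges : List String) (s : String) (t : String) (red_vertices : List String) : Int :=
  let adj := pvBuildAdjB edges
  if s == t then 0
  else
    pvLoopC adj t red_vertices ((adj.values.map List.length).sum + 2) (PySem.Set.ofList [s]) 0

-- ===== PRECONDITION & SPEC =====
-- Pre_ excludes exactly the edge lines on which Python's `u, v = edge.split(sep)` raises
-- ValueError (a stripped line containing ' -- ', or else ' -> ', more than once): both A and B raise there.
def Pre_solve_none (n : Int) (edges : List String) (s : String) (t : String) (red_vertices : List String) : Prop :=
  ∀ e ∈ edges,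
    (PySem.Str.isIn " -- " (PySem.Str.strip e) = true →
      ((PySem.Str.split? (PySem.Str.strip e) " -- ").getD []).length = 2) ∧
    (PySem.Str.isIn " -- " (PySem.Str.strip e) = false →
      PySem.Str.isIn " -> " (PySem.Str.strip e) = true →
      ((PySem.Str.split? (PySem.Str.strip e) " -> ").getD []).length = 2)

instance (n : Int) (edges : List String) (s : String) (t : String) (red_vertices : List String) : Decidable (Pre_solve_none n edges s t red_vertices) := by unfold Pre_solve_none; infer_instance

def pvWitness_solve_none : Int × List String × String × String × List String :=
  (0, ["a -- b", "b -> c"], "a", "c", ["b"])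

def Spec_solve_none (n : Int) (edges : List String) (s : String) (t : String) (red_vertices : List String) (out : Int) : Prop := out = solve_none_alt n edges s t red_vertices
instance (n : Int) (edges : List String) (s : String) (t : String) (red_vertices : List String) (out : Int) : Decidable (Spec_solve_none n edges s t red_vertices out) := by unfold Spec_solve_none; infer_instance

-- ===== CLAIM (what is proved, stated in full; the proofs are below) =====
def Claim_equal_solve_none : Prop := ∀ (n : Int) (edges : List String) (s : String) (t : String) (red_vertices : List String), Dom_solve_none n edges s t red_vertices → Pre_solve_none n edges s t red_vertices → Spec_solve_none n edges s t red_vertices (solve_none n edges s t red_vertices)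

-- ===== LEMMAS AND PROOFS =====

theorem pvBuildAdj_eq : pvBuildAdjA = pvBuildAdjB := rfl

-- Proof intermediary: a LEVEL-synchronous BFS (frontier lists + depth counter), used as a
-- bridge between A's queue BFS and B's reachable-set fixpoint.
def pvStepL (t : String) (red : List String) (depth : Int) :
    List String → List String → PySem.Set String → Except Int (List String × PySem.Set String)
  | [], nxt, vis => .ok (nxt, vis)
  | nb :: rest, nxt, vis =>
    if PySem.Set.contains vis nb then pvStepL t red depth rest nxt vis
    else if nb == t then .error (depth + 1)
    else if red.contains nb then pvStepL t red depth rest nxt vis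
    else pvStepL t red depth rest (nxt ++ [nb]) (PySem.Set.add vis nb)

def pvLayerL (adj : PySem.Dict String (List String)) (t : String) (red : List String) (depth : Int) :
    Nat → List String → List String → PySem.Set String → Except Int (Nat × List String × PySem.Set String)
  | f, [], nxt, vis => .ok (f, nxt, vis)
  | 0, _ :: _, _, _ => .error (-1)
  | f + 1, v :: rest, nxt, vis =>
    match pvStepL t red depth (adj.getD v []) nxt vis with
    | .error r => .error r
    | .ok (nxt', vis') => pvLayerL adj t red depth f rest nxt' vis'

theorem pvLayerL_le (adj : PySem.Dict String (List String)) (t : String) (red : List String)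
    (depth : Int) :
    ∀ (f : Nat) (front nxt : List String) (vis : PySem.Set String) (f' : Nat)
      (nxt' : List String) (vis' : PySem.Set String),
      pvLayerL adj t red depth f front nxt vis = .ok (f', nxt', vis') → f' ≤ f
  | f, [], nxt, vis, f', nxt', vis' => by
    intro h; simp [pvLayerL] at h; omega
  | 0, v :: rest, nxt, vis, f', nxt', vis' => by
    intro h; simp [pvLayerL] at h
  | f + 1, v :: rest, nxt, vis, f', nxt', vis' => by
    intro h
    simp only [pvLayerL] at h
    cases hs : pvStepL t red depth (adj.getD v []) nxt vis with
    | error r => rw [hs] at h; simp at h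
    | ok p =>
      rw [hs] at h
      have := pvLayerL_le adj t red depth f rest p.1 p.2 f' nxt' vis' h
      omega

theorem pvLayerL_lt (adj : PySem.Dict String (List String)) (t : String) (red : List String)
    (depth : Int) (f : Nat) (v : String) (rest nxt : List String) (vis : PySem.Set String)
    (f' : Nat) (nxt' : List String) (vis' : PySem.Set String)
    (h : pvLayerL adj t red depth f (v :: rest) nxt vis = .ok (f', nxt', vis')) : f' < f := by
  cases f with
  | zero => simp [pvLayerL] at h
  | succ g =>
    simp only [pvLayerL] at h
    cases hs : pvStepL t red depth (adj.getD v []) nxt vis with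
    | error r => rw [hs] at h; simp at h
    | ok p =>
      rw [hs] at h
      have := pvLayerL_le adj t red depth g rest p.1 p.2 f' nxt' vis' h
      omega

def pvLoopL (adj : PySem.Dict String (List String)) (t : String) (red : List String)
    (f : Nat) (frontier : List String) (vis : PySem.Set String) (depth : Int) : Int :=
  match frontier with
  | [] => -1
  | v :: rest =>
    match h : pvLayerL adj t red depth f (v :: rest) [] vis with
    | .error r => r
    | .ok (f', nxt, vis') => pvLoopL adj t red f' nxt vis' (depth + 1)
termination_by f
decreasing_by exact pvLayerL_lt adj t red depth f v rest [] vis _ _ _ h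

theorem pvLoopL_nil (adj : PySem.Dict String (List String)) (t : String) (red : List String)
    (f : Nat) (vis : PySem.Set String) (depth : Int) :
    pvLoopL adj t red f [] vis depth = -1 := by
  rw [pvLoopL]

theorem pvLoopL_cons (adj : PySem.Dict String (List String)) (t : String) (red : List String)
    (f : Nat) (v : String) (rest : List String) (vis : PySem.Set String) (depth : Int) :
    pvLoopL adj t red f (v :: rest) vis depth =
      (match pvLayerL adj t red depth f (v :: rest) [] vis with
       | .error r => r
       | .ok (f', nxt, vis') => pvLoopL adj t red f' nxt vis' (depth + 1)) := by
  conv_lhs => rw [pvLoopL]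
  split <;> rename_i heq <;> rw [heq]

-- LEG 1: A's queue BFS simulates the level BFS (one vertex's neighbor scan).
theorem pvStep_eq (t : String) (red : List String) (d : Int) :
    ∀ (nbs : List String) (P : List (String × Int)) (acc : List String) (vis : PySem.Set String),
      pvStepA t red d nbs (P ++ acc.map (fun x => (x, d + 1))) vis =
        (match pvStepL t red d nbs acc vis with
         | .error r => .error r
         | .ok (acc', vis') => .ok (P ++ acc'.map (fun x => (x, d + 1)), vis'))
  | [], P, acc, vis => rfl
  | nb :: rest, P, acc, vis => by
    simp only [pvStepA, pvStepL]
    split_ifs with h1 h2 h3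
    · exact pvStep_eq t red d rest P acc vis
    · rfl
    · exact pvStep_eq t red d rest P acc vis
    · have : (P ++ acc.map (fun x => (x, d + 1))) ++ [(nb, d + 1)] =
          P ++ (acc ++ [nb]).map (fun x => (x, d + 1)) := by
        simp [List.map_append]
      rw [this]
      exact pvStep_eq t red d rest P (acc ++ [nb]) (PySem.Set.add vis nb)

theorem pvMasterCons (adj : PySem.Dict String (List String)) (t : String) (red : List String)
    (f : Nat)
    (IH : ∀ g < f, ∀ (front acc : List String) (vis : PySem.Set String) (d : Int),
      pvLoopA adj t red g (front.map (fun x => (x, d)) ++ acc.map (fun x => (x, d + 1))) vis =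
        (match pvLayerL adj t red d g front acc vis with
         | .error r => r
         | .ok (f', nxt, vis') => pvLoopL adj t red f' nxt vis' (d + 1)))
    (v : String) (rest acc : List String) (vis : PySem.Set String) (d : Int) :
    pvLoopA adj t red f ((v :: rest).map (fun x => (x, d)) ++ acc.map (fun x => (x, d + 1))) vis =
      (match pvLayerL adj t red d f (v :: rest) acc vis with
       | .error r => r
       | .ok (f', nxt, vis') => pvLoopL adj t red f' nxt vis' (d + 1)) := by
  cases f with
  | zero => simp [pvLoopA, pvLayerL]
  | succ g =>
    simp only [List.map_cons, List.cons_append, pvLoopA, pvLayerL]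
    rw [pvStep_eq]
    cases hs : pvStepL t red d (adj.getD v []) acc vis with
    | error r => simp
    | ok p =>
      obtain ⟨acc', vis'⟩ := p
      simpa using IH g (Nat.lt_succ_self g) rest acc' vis' d

theorem pvMaster (adj : PySem.Dict String (List String)) (t : String) (red : List String)
    (f : Nat) :
    ∀ (front acc : List String) (vis : PySem.Set String) (d : Int),
      pvLoopA adj t red f (front.map (fun x => (x, d)) ++ acc.map (fun x => (x, d + 1))) vis =
        (match pvLayerL adj t red d f front acc vis with
         | .error r => r
         | .ok (f', nxt, vis') => pvLoopL adj t red f' nxt vis' (d + 1)) := by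
  induction f using Nat.strong_induction_on with
  | _ f IH =>
    intro front acc vis d
    cases front with
    | cons v rest =>
      exact pvMasterCons adj t red f (fun g hg => IH g hg) v rest acc vis d
    | nil =>
      cases acc with
      | nil => simp [pvLoopA, pvLayerL, pvLoopL_nil]
      | cons w acc2 =>
        have hcons := pvMasterCons adj t red f (fun g hg => IH g hg) w acc2 [] vis (d + 1)
        simp only [List.map_nil, List.append_nil, List.nil_append] at hcons ⊢
        rw [show pvLayerL adj t red d f [] (w :: acc2) vis = .ok (f, w :: acc2, vis) from by cases f <;> rfl]
        exact hcons.trans (pvLoopL_cons adj t red f w acc2 vis (d + 1)).symm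

-- A's entry point reaches the level BFS.
theorem pvA_eq_loopL (adj : PySem.Dict String (List String)) (t : String) (red : List String)
    (f : Nat) (s : String) :
    pvLoopA adj t red f [(s, 0)] (PySem.Set.ofList [s]) =
      pvLoopL adj t red f [s] (PySem.Set.ofList [s]) 0 := by
  have := pvMaster adj t red f [s] [] (PySem.Set.ofList [s]) 0
  simpa [pvLoopL_cons] using this

-- LEG 2: the level BFS equals B's reachable-set fixpoint.

-- membership in pvExpand
theorem pvMem_expand_aux (adj : PySem.Dict String (List String)) (x : String) :
    ∀ (R : List String) (st : PySem.Set String),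
      (x ∈ R.foldl (fun st u => PySem.Set.update st (adj.getD u [])) st ↔
        x ∈ st ∨ ∃ u ∈ R, x ∈ adj.getD u [])
  | [], st => by simp
  | u :: R, st => by
    simp only [List.foldl_cons]
    rw [pvMem_expand_aux adj x R]
    simp [PySem.Set.mem_update]
    tauto

theorem pvMem_expand (adj : PySem.Dict String (List String)) (R : PySem.Set String) (x : String) :
    x ∈ pvExpand adj R ↔ ∃ u ∈ R, x ∈ adj.getD u [] := by
  unfold pvExpand
  rw [pvMem_expand_aux adj x R PySem.Set.empty]
  simp [PySem.Set.empty]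

-- pvLoopC only depends on the reach set's MEMBERS, not their order.
theorem pvLoopC_congr (adj : PySem.Dict String (List String)) (t : String) (red : List String) :
    ∀ (f : Nat) (R R' : PySem.Set String) (d : Int),
      (∀ x, x ∈ R ↔ x ∈ R') →
      pvLoopC adj t red f R d = pvLoopC adj t red f R' d
  | 0, R, R', d => fun _ => rfl
  | f + 1, R, R', d => fun h => by
    have hstep : ∀ x, x ∈ pvExpand adj R ↔ x ∈ pvExpand adj R' := by
      intro x; rw [pvMem_expand, pvMem_expand]
      constructor
      · rintro ⟨u, hu, hx⟩; exact ⟨u, (h u).mp hu, hx⟩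
      · rintro ⟨u, hu, hx⟩; exact ⟨u, (h u).mpr hu, hx⟩
    have hc : PySem.Set.contains (pvExpand adj R) t = PySem.Set.contains (pvExpand adj R') t := by
      by_cases hm : t ∈ pvExpand adj R
      · rw [(PySem.Set.contains_iff _ _).mpr hm, (PySem.Set.contains_iff _ _).mpr ((hstep t).mp hm)]
      · have hm' : t ∉ pvExpand adj R' := fun hx => hm ((hstep t).mpr hx)
        rw [Bool.eq_false_iff.mpr (fun hx => hm ((PySem.Set.contains_iff _ _).mp hx)),
            Bool.eq_false_iff.mpr (fun hx => hm' ((PySem.Set.contains_iff _ _).mp hx))]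
    simp only [pvLoopC]
    rw [hc]
    by_cases hct : PySem.Set.contains (pvExpand adj R') t = true
    · rw [hct]; simp
    · rw [Bool.eq_false_iff.mpr hct]
      simp only [Bool.false_eq_true, if_false]
      have hg : ∀ x, x ∈ PySem.Set.union R (PySem.Set.ofList ((pvExpand adj R).filter (fun v => !(red.contains v)))) ↔
          x ∈ PySem.Set.union R' (PySem.Set.ofList ((pvExpand adj R').filter (fun v => !(red.contains v)))) := by
        intro x
        rw [PySem.Set.mem_union, PySem.Set.mem_union, PySem.Set.mem_ofList, PySem.Set.mem_ofList]
        simp only [List.mem_filter]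
        rw [h x, hstep x]
      have he : PySem.Set.equal (PySem.Set.union R (PySem.Set.ofList ((pvExpand adj R).filter (fun v => !(red.contains v))))) R =
          PySem.Set.equal (PySem.Set.union R' (PySem.Set.ofList ((pvExpand adj R').filter (fun v => !(red.contains v))))) R' := by
        by_cases hq : PySem.Set.equal (PySem.Set.union R (PySem.Set.ofList ((pvExpand adj R).filter (fun v => !(red.contains v))))) R = true
        · rw [hq]
          have := (PySem.Set.equal_iff _ _).mp hq
          exact ((PySem.Set.equal_iff _ _).mpr (fun x => by rw [← hg x, this x, h x])).symm
        · rw [Bool.eq_false_iff.mpr hq]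
          by_cases hq' : PySem.Set.equal (PySem.Set.union R' (PySem.Set.ofList ((pvExpand adj R').filter (fun v => !(red.contains v))))) R' = true
          · exact absurd ((PySem.Set.equal_iff _ _).mpr (fun x => by
              rw [hg x, ((PySem.Set.equal_iff _ _).mp hq') x, ← h x])) hq
          · rw [Bool.eq_false_iff.mpr hq']
      rw [he]
      by_cases hfix : PySem.Set.equal (PySem.Set.union R' (PySem.Set.ofList ((pvExpand adj R').filter (fun v => !(red.contains v))))) R' = true
      · rw [hfix]; simp
      · rw [Bool.eq_false_iff.mpr hfix]
        simp only [Bool.false_eq_true, if_false]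
        exact pvLoopC_congr adj t red f _ _ (d + 1) hg

-- pvStepL characterized: error exactly when t is among the neighbors (t never in visited).
theorem pvStepL_err (t : String) (red : List String) (d : Int) :
    ∀ (nbs : List String) (nxt : List String) (vis : PySem.Set String),
      t ∉ vis → t ∈ nbs → pvStepL t red d nbs nxt vis = .error (d + 1)
  | [], nxt, vis => by intro _ h; simp at h
  | nb :: rest, nxt, vis => by
    intro ht h
    simp only [pvStepL]
    by_cases h1 : PySem.Set.contains vis nb
    · rw [if_pos h1]
      have hnb : nb ≠ t := fun he => ht (he ▸ (PySem.Set.contains_iff _ _).mp h1)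
      exact pvStepL_err t red d rest nxt vis ht (by
        rcases List.mem_cons.mp h with h | h
        · exact absurd h.symm hnb
        · exact h)
    · rw [if_neg h1]
      by_cases h2 : nb == t
      · rw [if_pos h2]
      · rw [if_neg h2]
        have hnb : nb ≠ t := fun he => h2 (by simp [he])
        have hrest : t ∈ rest := by
          rcases List.mem_cons.mp h with h | h
          · exact absurd h.symm hnb
          · exact h
        by_cases h3 : red.contains nb
        · rw [if_pos h3]; exact pvStepL_err t red d rest nxt vis ht hrest
        · rw [if_neg h3]
          exact pvStepL_err t red d rest _ _ (by
            rw [PySem.Set.mem_add]; rintro (h | h); exact ht h; exact hnb h.symm) hrest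

theorem pvStepL_ok (t : String) (red : List String) (d : Int) :
    ∀ (nbs : List String) (nxt : List String) (vis : PySem.Set String),
      t ∉ vis → t ∉ nbs →
      ∃ Δ : List String, pvStepL t red d nbs nxt vis = .ok (nxt ++ Δ, vis ++ Δ) ∧ Δ.Nodup ∧
        (∀ x, x ∈ Δ ↔ x ∈ nbs ∧ red.contains x = false ∧ x ∉ vis)
  | [], nxt, vis => by
    intro _ _
    exact ⟨[], by simp [pvStepL], by simp, by simp⟩
  | nb :: rest, nxt, vis => by
    intro ht hn
    have hnbt : nb ≠ t := fun he => hn (by simp [he])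
    have hrt : t ∉ rest := fun h => hn (List.mem_cons_of_mem _ h)
    simp only [pvStepL]
    by_cases h1 : PySem.Set.contains vis nb
    · rw [if_pos h1]
      obtain ⟨Δ, he, hnd, hm⟩ := pvStepL_ok t red d rest nxt vis ht hrt
      refine ⟨Δ, he, hnd, fun x => ?_⟩
      rw [hm x]
      constructor
      · rintro ⟨hx, hr, hv⟩; exact ⟨List.mem_cons_of_mem _ hx, hr, hv⟩
      · rintro ⟨hx, hr, hv⟩
        rcases List.mem_cons.mp hx with h | h
        · exact absurd (h ▸ (PySem.Set.contains_iff _ _).mp h1) hv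
        · exact ⟨h, hr, hv⟩
    · rw [if_neg h1]
      rw [if_neg (by simp [hnbt])]
      by_cases h3 : red.contains nb
      · rw [if_pos h3]
        obtain ⟨Δ, he, hnd, hm⟩ := pvStepL_ok t red d rest nxt vis ht hrt
        refine ⟨Δ, he, hnd, fun x => ?_⟩
        rw [hm x]
        constructor
        · rintro ⟨hx, hr, hv⟩; exact ⟨List.mem_cons_of_mem _ hx, hr, hv⟩
        · rintro ⟨hx, hr, hv⟩
          rcases List.mem_cons.mp hx with h | h
          · rw [h] at hr; rw [hr] at h3; simp at h3
          · exact ⟨h, hr, hv⟩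
      · rw [if_neg h3]
        have hnbv : nb ∉ vis := fun h => h1 ((PySem.Set.contains_iff _ _).mpr h)
        rw [PySem.Set.add_of_not_mem hnbv]
        have ht' : t ∉ vis ++ [nb] := by
          simp only [List.mem_append, List.mem_singleton]
          rintro (h | h); exact ht h; exact hnbt h.symm
        obtain ⟨Δ, he, hnd, hm⟩ := pvStepL_ok t red d rest (nxt ++ [nb]) (vis ++ [nb]) ht' hrt
        have hnbΔ : nb ∉ Δ := fun h => ((hm nb).mp h).2.2 (by simp)
        refine ⟨nb :: Δ, by simpa using he, List.nodup_cons.mpr ⟨hnbΔ, hnd⟩, fun x => ?_⟩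
        simp only [List.mem_cons]
        constructor
        · rintro (rfl | hx)
          · exact ⟨Or.inl rfl, Bool.eq_false_iff.mpr h3, hnbv⟩
          · obtain ⟨ha, hb, hc⟩ := (hm x).mp hx
            exact ⟨Or.inr ha, hb, fun h => hc (List.mem_append_left _ h)⟩
        · rintro ⟨ha, hb, hc⟩
          by_cases hx : x = nb
          · exact Or.inl hx
          · rcases ha with h | h
            · exact absurd h hx
            · exact Or.inr ((hm x).mpr ⟨h, hb, by
                simp only [List.mem_append, List.mem_singleton]
                rintro (hh | hh); exact hc hh; exact hx hh⟩)

-- pvLayerL characterized, given enough fuel for the layer.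
theorem pvLayerL_err (adj : PySem.Dict String (List String)) (t : String) (red : List String) (d : Int) :
    ∀ (F : List String) (f : Nat) (nxt : List String) (vis : PySem.Set String),
      t ∉ vis → F.length ≤ f → (∃ u ∈ F, t ∈ adj.getD u []) →
      pvLayerL adj t red d f F nxt vis = .error (d + 1)
  | [], f, nxt, vis => by rintro _ _ ⟨u, h, _⟩; simp at h
  | v :: rest, f, nxt, vis => by
    rintro ht hf ⟨u, hu, hut⟩
    obtain ⟨g, rfl⟩ : ∃ g, f = g + 1 := ⟨f - 1, by simp at hf; omega⟩
    simp only [pvLayerL]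
    by_cases hv : t ∈ adj.getD v []
    · rw [pvStepL_err t red d _ nxt vis ht hv]
    · have hvu : u ∈ rest := by
        rcases List.mem_cons.mp hu with h | h
        · exact absurd (h ▸ hut) hv
        · exact h
      obtain ⟨Δ, he, _, hm⟩ := pvStepL_ok t red d (adj.getD v []) nxt vis ht hv
      rw [he]
      have ht' : t ∉ vis ++ Δ := by
        simp only [List.mem_append]
        rintro (h | h); exact ht h; exact hv ((hm t).mp h).1
      exact pvLayerL_err adj t red d rest g _ _ ht' (by simp at hf; omega) ⟨u, hvu, hut⟩

theorem pvLayerL_ok (adj : PySem.Dict String (List String)) (t : String) (red : List String) (d : Int) :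
    ∀ (F : List String) (f : Nat) (nxt : List String) (vis : PySem.Set String),
      t ∉ vis → F.length ≤ f → (¬ ∃ u ∈ F, t ∈ adj.getD u []) →
      ∃ Δ : List String, pvLayerL adj t red d f F nxt vis = .ok (f - F.length, nxt ++ Δ, vis ++ Δ) ∧
        Δ.Nodup ∧
        (∀ x, x ∈ Δ ↔ (∃ u ∈ F, x ∈ adj.getD u []) ∧ red.contains x = false ∧ x ∉ vis)
  | [], f, nxt, vis => by
    intro _ _ _
    refine ⟨[], ?_, by simp, by simp⟩
    cases f <;> simp [pvLayerL]
  | v :: rest, f, nxt, vis => by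
    intro ht hf hT
    obtain ⟨g, rfl⟩ : ∃ g, f = g + 1 := ⟨f - 1, by simp at hf; omega⟩
    have hv : t ∉ adj.getD v [] := fun h => hT ⟨v, List.mem_cons_self, h⟩
    simp only [pvLayerL]
    obtain ⟨Δ1, he1, hnd1, hm1⟩ := pvStepL_ok t red d (adj.getD v []) nxt vis ht hv
    rw [he1]
    have ht' : t ∉ vis ++ Δ1 := by
      simp only [List.mem_append]
      rintro (h | h); exact ht h; exact hv ((hm1 t).mp h).1
    obtain ⟨Δ2, he2, hnd2, hm2⟩ := pvLayerL_ok adj t red d rest g (nxt ++ Δ1) (vis ++ Δ1) ht'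
      (by simp at hf; omega) (fun ⟨u, hu, hut⟩ => hT ⟨u, List.mem_cons_of_mem _ hu, hut⟩)
    refine ⟨Δ1 ++ Δ2, ?_, ?_, ?_⟩
    · show pvLayerL adj t red d g rest (nxt ++ Δ1) (vis ++ Δ1) =
        Except.ok (g + 1 - (v :: rest).length, nxt ++ (Δ1 ++ Δ2), vis ++ (Δ1 ++ Δ2))
      rw [he2]
      have : g + 1 - (v :: rest).length = g - rest.length := by simp
      rw [this]
      simp [List.append_assoc]
    · refine List.Nodup.append hnd1 hnd2 (fun x hx1 hx2 => ?_)
      exact ((hm2 x).mp hx2).2.2 (List.mem_append_right _ hx1)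
    · intro x
      simp only [List.mem_append]
      constructor
      · rintro (h | h)
        · obtain ⟨ha, hb, hc⟩ := (hm1 x).mp h
          exact ⟨⟨v, List.mem_cons_self, ha⟩, hb, hc⟩
        · obtain ⟨⟨u, hu, hux⟩, hb, hc⟩ := (hm2 x).mp h
          exact ⟨⟨u, List.mem_cons_of_mem _ hu, hux⟩, hb,
            fun hv' => hc (List.mem_append_left _ hv')⟩
      · rintro ⟨⟨u, hu, hux⟩, hb, hc⟩
        by_cases h1 : x ∈ Δ1
        · exact Or.inl h1
        · rcases List.mem_cons.mp hu with rfl | hur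
          · exact absurd ((hm1 x).mpr ⟨hux, hb, hc⟩) h1
          · refine Or.inr ((hm2 x).mpr ⟨⟨u, hur, hux⟩, hb, ?_⟩)
            simp only [List.mem_append]
            rintro (h | h); exact hc h; exact h1 h

-- counting: a Nodup list included in another list is no longer than a Nodup superlist
theorem pvLen_le (l m : List String) (hl : l.Nodup) (hsub : ∀ x ∈ l, x ∈ m) :
    l.length ≤ m.length := by
  classical
  calc l.length = l.toFinset.card := (List.toFinset_card_of_nodup hl).symm
    _ ≤ m.toFinset.card := Finset.card_le_card (fun x hx => by
        rw [List.mem_toFinset] at hx ⊢; exact hsub x hx)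
    _ ≤ m.length := List.toFinset_card_le m

-- The main simulation: level BFS = reachable-set fixpoint, under the closure invariant.
theorem pvLeg2 (adj : PySem.Dict String (List String)) (t : String) (red : List String)
    (U : List String) (hUnd : U.Nodup)
    (hN : ∀ u x, x ∈ adj.getD u [] → x ∈ U) :
    ∀ (fC fB : Nat) (F : List String) (vis : PySem.Set String) (d : Int),
      vis.Nodup → (∀ v ∈ F, v ∈ vis) → t ∉ vis →
      (∀ v ∈ vis, v ∈ U) →
      (∀ u ∈ vis, u ∉ F → ∀ v ∈ adj.getD u [], v ≠ t ∧ (red.contains v = false → v ∈ vis)) →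
      F.length + (U.length - vis.length) + 1 ≤ fB →
      (U.length - vis.length) + 1 ≤ fC →
      pvLoopL adj t red fB F vis d = pvLoopC adj t red fC vis d
  | 0, fB, F, vis, d => by intro _ _ _ _ _ _ h; omega
  | fC + 1, fB, F, vis, d => by
    intro hvnd hFv ht hvU hcl hfB hfC
    have hvisU : vis.length ≤ U.length := pvLen_le vis U hvnd hvU
    simp only [pvLoopC]
    cases F with
    | nil =>
      rw [pvLoopL_nil]
      have hstep : ∀ x, x ∈ pvExpand adj vis → x ≠ t ∧ (red.contains x = false → x ∈ vis) := by
        intro x hx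
        obtain ⟨u, hu, hux⟩ := (pvMem_expand adj vis x).mp hx
        exact hcl u hu (by simp) x hux
      have hct : PySem.Set.contains (pvExpand adj vis) t = false := by
        apply Bool.eq_false_iff.mpr
        intro h
        exact (hstep t ((PySem.Set.contains_iff _ _).mp h)).1 rfl
      rw [hct]
      simp only [Bool.false_eq_true, if_false]
      have heq : PySem.Set.equal (PySem.Set.union vis (PySem.Set.ofList ((pvExpand adj vis).filter (fun v => !(red.contains v))))) vis = true := by
        apply (PySem.Set.equal_iff _ _).mpr
        intro x
        rw [PySem.Set.mem_union, PySem.Set.mem_ofList]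
        simp only [List.mem_filter, Bool.not_eq_eq_eq_not, Bool.not_true]
        constructor
        · rintro (h | ⟨h1, h2⟩)
          · exact h
          · exact (hstep x h1).2 h2
        · exact Or.inl
      rw [heq]
      simp
    | cons v rest =>
      rw [pvLoopL_cons]
      have hlen : (v :: rest).length ≤ fB := by omega
      by_cases hT : ∃ u ∈ v :: rest, t ∈ adj.getD u []
      · rw [pvLayerL_err adj t red d (v :: rest) fB [] vis ht hlen hT]
        have hct : PySem.Set.contains (pvExpand adj vis) t = true := by
          apply (PySem.Set.contains_iff _ _).mpr
          obtain ⟨u, hu, hut⟩ := hT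
          exact (pvMem_expand adj vis t).mpr ⟨u, hFv u hu, hut⟩
        rw [hct]
        simp
      · obtain ⟨Δ, he, hΔnd, hΔm⟩ := pvLayerL_ok adj t red d (v :: rest) fB [] vis ht hlen hT
        rw [he]
        simp only [List.nil_append]
        -- t is not in the one-step expansion of vis
        have hstepT : t ∉ pvExpand adj vis := by
          intro hx
          obtain ⟨u, hu, hut⟩ := (pvMem_expand adj vis t).mp hx
          by_cases huF : u ∈ v :: rest
          · exact hT ⟨u, huF, hut⟩
          · exact (hcl u hu huF t hut).1 rfl
        have hct : PySem.Set.contains (pvExpand adj vis) t = false :=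
          Bool.eq_false_iff.mpr (fun h => hstepT ((PySem.Set.contains_iff _ _).mp h))
        rw [hct]
        simp only [Bool.false_eq_true, if_false]
        -- grown has the same members as vis ++ Δ
        have hgm : ∀ x, x ∈ PySem.Set.union vis (PySem.Set.ofList ((pvExpand adj vis).filter (fun w => !(red.contains w)))) ↔ x ∈ vis ++ Δ := by
          intro x
          rw [PySem.Set.mem_union, PySem.Set.mem_ofList]
          simp only [List.mem_filter, Bool.not_eq_eq_eq_not, Bool.not_true, List.mem_append]
          constructor
          · rintro (h | ⟨h1, h2⟩)
            · exact Or.inl h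
            · obtain ⟨u, hu, hux⟩ := (pvMem_expand adj vis x).mp h1
              by_cases huF : u ∈ v :: rest
              · by_cases hxv : x ∈ vis
                · exact Or.inl hxv
                · exact Or.inr ((hΔm x).mpr ⟨⟨u, huF, hux⟩, h2, hxv⟩)
              · exact Or.inl ((hcl u hu huF x hux).2 h2)
          · rintro (h | h)
            · exact Or.inl h
            · obtain ⟨⟨u, hu, hux⟩, hb, hc⟩ := (hΔm x).mp h
              exact Or.inr ⟨(pvMem_expand adj vis x).mpr ⟨u, hFv u hu, hux⟩, hb⟩
        -- facts about Δ
        have hΔvis : ∀ x ∈ Δ, x ∉ vis := fun x hx => ((hΔm x).mp hx).2.2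
        have hΔt : t ∉ Δ := fun hx => hT (((hΔm t).mp hx).1)
        have hΔU : ∀ x ∈ Δ, x ∈ U := fun x hx => by
          obtain ⟨⟨u, _, hux⟩, _, _⟩ := (hΔm x).mp hx
          exact hN u x hux
        have hnd' : (vis ++ Δ).Nodup := List.Nodup.append hvnd hΔnd
          (fun x hx1 hx2 => hΔvis x hx2 hx1)
        have hlenU : vis.length + Δ.length ≤ U.length := by
          have := pvLen_le (vis ++ Δ) U hnd' (fun x hx => by
            rcases List.mem_append.mp hx with h | h
            · exact hvU x h
            · exact hΔU x h)
          simpa using this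
        cases hΔ : Δ with
        | nil =>
          subst hΔ
          -- fixpoint: grown == vis, both return -1
          have heq : PySem.Set.equal (PySem.Set.union vis (PySem.Set.ofList ((pvExpand adj vis).filter (fun w => !(red.contains w))))) vis = true := by
            apply (PySem.Set.equal_iff _ _).mpr
            intro x
            rw [hgm x]
            simp
          rw [heq]
          simp [pvLoopL_nil]
        | cons w Δr =>
          subst hΔ
          have hneq : PySem.Set.equal (PySem.Set.union vis (PySem.Set.ofList ((pvExpand adj vis).filter (fun q => !(red.contains q))))) vis = false := by
            apply Bool.eq_false_iff.mpr
            intro h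
            have := ((PySem.Set.equal_iff _ _).mp h w).mp ((hgm w).mpr (by simp))
            exact hΔvis w (by simp) this
          rw [hneq]
          simp only [Bool.false_eq_true, if_false]
          rw [pvLoopC_congr adj t red fC _ (vis ++ w :: Δr) (d + 1) hgm]
          apply pvLeg2 adj t red U hUnd hN fC (fB - (v :: rest).length) (w :: Δr) (vis ++ w :: Δr) (d + 1)
            hnd'
            (fun x hx => List.mem_append_right _ hx)
            (by simp only [List.mem_append]; rintro (h | h); exact ht h; exact hΔt h)
            (fun x hx => by
              rcases List.mem_append.mp hx with h | h
              · exact hvU x h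
              · exact hΔU x h)
            (fun u hu huF w' hw' => by
              rcases List.mem_append.mp hu with h | h
              · by_cases huvr : u ∈ v :: rest
                · constructor
                  · intro he'; exact hT ⟨u, huvr, he' ▸ hw'⟩
                  · intro hred
                    by_cases hwv : w' ∈ vis
                    · exact List.mem_append_left _ hwv
                    · exact List.mem_append_right _ ((hΔm w').mpr ⟨⟨u, huvr, hw'⟩, hred, hwv⟩)
                · obtain ⟨h1, h2⟩ := hcl u h huvr w' hw'
                  exact ⟨h1, fun hr => List.mem_append_left _ (h2 hr)⟩
              · exact absurd h huF)
            (by simp at hlenU hfB ⊢; omega)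
            (by simp at hlenU hfC ⊢; omega)

-- neighbor lists live inside the universe s :: adj.values.flatten
theorem pvNbhd_sub (adj : PySem.Dict String (List String)) (s u x : String)
    (hx : x ∈ adj.getD u []) : x ∈ s :: adj.values.flatten := by
  rcases h : adj.get? u with _ | l
  · rw [PySem.Dict.getD_eq_get?_getD, h] at hx
    simp at hx
  · rw [PySem.Dict.getD_eq_get?_getD, h] at hx
    simp only [Option.getD_some] at hx
    have : (u, l) ∈ adj.items := PySem.Dict.mem_items_of_get?_eq_some adj h
    exact List.mem_cons_of_mem _ (List.mem_flatten.mpr ⟨l, List.mem_map_of_mem this, hx⟩)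

-- ===== VERDICT (by name: the statement is the Claim_ definition above) =====
theorem solve_none_spec : Claim_equal_solve_none := by
  intro n edges s t red_vertices _hdom _hpre
  unfold Spec_solve_none solve_none solve_none_alt
  rw [← pvBuildAdj_eq]
  by_cases hst : s == t
  · simp [hst]
  · simp only [hst, Bool.false_eq_true, if_false]
    set adj := pvBuildAdjA edges with hadj
    set U : List String := PySem.Set.ofList (s :: adj.values.flatten) with hU
    have hsne : s ≠ t := fun h => by simp [h] at hst
    have hUnd : U.Nodup := PySem.Set.nodup_ofList _
    have hN : ∀ u x, x ∈ adj.getD u [] → x ∈ U := fun u x hx =>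
      (PySem.Set.mem_ofList _ _).mpr (pvNbhd_sub adj s u x hx)
    have hsU : s ∈ U := (PySem.Set.mem_ofList _ _).mpr List.mem_cons_self
    have hUlen : U.length ≤ adj.values.flatten.length + 1 := by
      have := PySem.Set.length_ofList_le (s :: adj.values.flatten)
      simpa using this
    have hflat : adj.values.flatten.length = (adj.values.map List.length).sum :=
      List.length_flatten
    have hvis : PySem.Set.ofList [s] = [s] := rfl
    rw [pvA_eq_loopL adj t red_vertices _ s, hvis]
    have hUpos : 1 ≤ U.length := List.length_pos_of_mem hsU
    apply pvLeg2 adj t red_vertices U hUnd hN _ _ [s] [s] 0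
      (by simp)
      (by simp)
      (by simpa using fun h => hsne h.symm)
      (by simpa using hsU)
      (fun u hu huF => by simp at hu huF; exact absurd hu huF)
      (by simp; omega)
      (by simp; omega)
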